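-- pv_equiv track=rewrite | github.com/waratecs123/Translater-Apps | Action-On-Ip-Addresses/ip_address_checker/ip_address_checker.py | net_id
-- ===== SOURCE A (Python) =====
-- MIN_IP_LENGTH = 7
--
-- MAX_IP_LENGTH = 15
--
-- OCTET_COUNT = 4
--
-- MAX_OCTET_VALUE = 255
--
-- MIN_OCTET_VALUE = 0
--
-- def is_valid_ip_address(ip_address: str) -> bool:
--     try:
--         if len(ip_address) < MIN_IP_LENGTH or len(ip_address) > MAX_IP_LENGTH:
--             return False
--         else:
--             x_1 = ip_address.split(".")
--             if len(x_1) == OCTET_COUNT: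
--                 for i in x_1:
--                     if int(i) < MIN_OCTET_VALUE or int(i) > MAX_OCTET_VALUE:
--                         return False
--                 return True
--     except ValueError:
--         return False
--
-- def class_ip_address(ip_address: str) -> str:
--     if not is_valid_ip_address(ip_address):
--         return "Неверный формат IP-адреса!"
--
--     try:
--         x_1 = ip_address.split(".")
--         y = int(x_1[0])
--         if 1 <= y <= 126:
--             return "A"
--         elif 128 <= y <= 191:
--             return "B"
--         elif 192 <= y <= 223:
--             return "C"
--         elif 224 <= y <= 239:
--             return "D"
--         elif 240 <= y <= 255:
--             return "E"
--         else:
--             return "Неопределенный класс"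
--     except Exception as e:
--         return f"Неизвеастная ошибка - {e}"
--
-- def default_mask(ip_address: str) -> str:
--     if not is_valid_ip_address(ip_address):
--         return "Неверный формат IP-адреса!"
--
--     try:
--         class_ip_adr = class_ip_address(ip_address)
--         if class_ip_adr == "A":
--             return "255.0.0.0"
--         elif class_ip_adr == "B":
--             return "255.255.0.0"
--         elif class_ip_adr == "C":
--             return "255.255.255.0"
--         elif class_ip_adr == "D":
--             return "Не имеет маски по умолчанию"
--         elif class_ip_adr == "E":
--             return "Не имеет маски по умолчанию"
--         else:
--             return "Неопределенная маска - класс не найден"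
--     except Exception as e:
--         return f"Неизвеастная ошибка - {e}"
--
-- def net_id(ip_address: str) -> str:
--     try:
--         if not is_valid_ip_address(ip_address):
--             return "Неверный формат IP-адреса!"
--
--         mask = default_mask(ip_address)
--         if not is_valid_ip_address(mask):
--             return "Не имеет маски по умолчанию"
--
--         ip_octets = [int(x) for x in ip_address.split(".")]
--         mask_octets = [int(x) for x in mask.split(".")]
--
--         net_octets = []
--         for ip_octet, mask_octet in zip(ip_octets, mask_octets):
--             net_octets.append(str(ip_octet & mask_octet))  # Побитовое И
--
--         return ".".join(net_octets)
--
--     except Exception as e: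
--         return f"Неизвестная ошибка - {e}"
-- ===== SOURCE B (Python) =====
-- # Single-pass rewrite: parse the four octets once, classify the first octet,
-- # and build the network id by keeping 1/2/3 leading octets and zero-filling;
-- # no mask string, no re-validation, no bitwise AND.
-- def net_id(ip_address: str) -> str:
--     if not (7 <= len(ip_address) <= 15):
--         return "Неверный формат IP-адреса!"
--     parts = ip_address.split(".")
--     if len(parts) != 4:
--         return "Неверный формат IP-адреса!"
--     octets = []
--     for p in parts:
--         try:
--             v = int(p)
--         except ValueError:
--             return "Неверный формат IP-адреса!"
--         if v < 0 or v > 255: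
--             return "Неверный формат IP-адреса!"
--         octets.append(v)
--     y = octets[0]
--     if 1 <= y <= 126:
--         return f"{y}.0.0.0"
--     if 128 <= y <= 191:
--         return f"{y}.{octets[1]}.0.0"
--     if 192 <= y <= 223:
--         return f"{y}.{octets[1]}.{octets[2]}.0"
--     return "Не имеет маски по умолчанию"
-- ===== Notes on version B (the rewrite author's own statement) =====
-- stated objective: simpler
-- what changed: Single pass: parse the four octets once and build the network id by keeping 1/2/3 leading octets per class with zero-fill, instead of triple validation, class letter -> mask string -> re-parse mask -> bitwise AND -> join.
import Mathlib
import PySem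

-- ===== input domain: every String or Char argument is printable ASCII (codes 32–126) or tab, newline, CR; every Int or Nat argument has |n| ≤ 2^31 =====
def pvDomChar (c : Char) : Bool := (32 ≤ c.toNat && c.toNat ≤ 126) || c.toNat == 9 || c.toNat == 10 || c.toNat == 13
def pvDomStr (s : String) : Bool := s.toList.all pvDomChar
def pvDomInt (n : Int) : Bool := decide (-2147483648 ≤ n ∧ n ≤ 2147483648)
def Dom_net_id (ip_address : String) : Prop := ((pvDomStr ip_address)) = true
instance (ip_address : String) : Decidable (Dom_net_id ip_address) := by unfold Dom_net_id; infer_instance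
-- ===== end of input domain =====

-- B computes the same network id in one pass (parse the 4 octets once, then truncate by class);
-- A validates three times, maps class letter -> mask string, re-parses the mask and bitwise-ANDs.

-- ===== PORT A =====
-- the 'for i in x_1' loop of is_valid_ip_address; int(i) raising ValueError is the caught branch → False
def pvCheckOctets : List String → Bool
  | [] => true
  | s :: rest =>
    match PySem.Int.ofStr? s with
    | none => false
    | some v => if v < 0 ∨ v > 255 then false else pvCheckOctets rest

def is_valid_ip_address (ip_address : String) : Bool :=
  if PySem.Str.len ip_address < 7 ∨ PySem.Str.len ip_address > 15 then false
  else
    let x1 := (PySem.Str.split? ip_address ".").getD []   -- sep "." ≠ "": split? is always some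
    if x1.length = 4 then pvCheckOctets x1
    else false   -- Python falls off the function (returns None, falsy in every use site)

def class_ip_address (ip_address : String) : String :=
  if !(is_valid_ip_address ip_address) then "Неверный формат IP-адреса!"
  else
    let x1 := (PySem.Str.split? ip_address ".").getD []
    match (PySem.List.pyGet? x1 0).bind PySem.Int.ofStr? with
    | none => "Неизвеастная ошибка - "   -- 'except Exception' branch; unreachable: ip was validated
    | some y =>
      if 1 ≤ y ∧ y ≤ 126 then "A"
      else if 128 ≤ y ∧ y ≤ 191 then "B"
      else if 192 ≤ y ∧ y ≤ 223 then "C"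
      else if 224 ≤ y ∧ y ≤ 239 then "D"
      else if 240 ≤ y ∧ y ≤ 255 then "E"
      else "Неопределенный класс"

def default_mask (ip_address : String) : String :=
  if !(is_valid_ip_address ip_address) then "Неверный формат IP-адреса!"
  else
    let c := class_ip_address ip_address
    if c = "A" then "255.0.0.0"
    else if c = "B" then "255.255.0.0"
    else if c = "C" then "255.255.255.0"
    else if c = "D" then "Не имеет маски по умолчанию"
    else if c = "E" then "Не имеет маски по умолчанию"
    else "Неопределенная маска - класс не найден"

def net_id (ip_address : String) : String :=
  if !(is_valid_ip_address ip_address) then "Неверный формат IP-адреса!"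
  else
    let mask := default_mask ip_address
    if !(is_valid_ip_address mask) then "Не имеет маски по умолчанию"
    else
      -- int(x) never raises here: both strings were validated
      let ip_octets := ((PySem.Str.split? ip_address ".").getD []).map (fun x => (PySem.Int.ofStr? x).getD 0)
      let mask_octets := ((PySem.Str.split? mask ".").getD []).map (fun x => (PySem.Int.ofStr? x).getD 0)
      let net_octets := (ip_octets.zip mask_octets).foldl
        (fun acc p => acc ++ [PySem.Int.toStr (PySem.Int.band p.1 p.2)]) []
      PySem.Str.join "." net_octets

-- ===== PORT B =====
-- the parsing loop of B: builds the octet list, none = B's early error return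
def pvParseOctets : List String → Option (List Int)
  | [] => some []
  | p :: rest =>
    match PySem.Int.ofStr? p with
    | none => none
    | some v =>
      if v < 0 ∨ v > 255 then none
      else (pvParseOctets rest).map (fun vs => v :: vs)

-- f-strings like f"{y}.{o1}.0.0" are rendered with PySem.Str.join over the octet strings
-- (same string value; Lean's own String.append is kernel-opaque)
def net_id_alt (ip_address : String) : String :=
  if !(7 ≤ PySem.Str.len ip_address ∧ PySem.Str.len ip_address ≤ 15) then "Неверный формат IP-адреса!"
  else
    let parts := (PySem.Str.split? ip_address ".").getD []
    if parts.length ≠ 4 then "Неверный формат IP-адреса!"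
    else
      match pvParseOctets parts with
      | none => "Неверный формат IP-адреса!"
      | some octets =>
        let y := PySem.List.pyGetD octets 0 0
        if 1 ≤ y ∧ y ≤ 126 then
          PySem.Str.join "." [PySem.Int.toStr y, "0", "0", "0"]
        else if 128 ≤ y ∧ y ≤ 191 then
          PySem.Str.join "." [PySem.Int.toStr y, PySem.Int.toStr (PySem.List.pyGetD octets 1 0), "0", "0"]
        else if 192 ≤ y ∧ y ≤ 223 then
          PySem.Str.join "." [PySem.Int.toStr y, PySem.Int.toStr (PySem.List.pyGetD octets 1 0),
                              PySem.Int.toStr (PySem.List.pyGetD octets 2 0), "0"]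
        else "Не имеет маски по умолчанию"

-- ===== PRECONDITION & SPEC =====
def Spec_net_id (ip_address : String) (out : String) : Prop := out = net_id_alt ip_address
instance (ip_address : String) (out : String) : Decidable (Spec_net_id ip_address out) := by unfold Spec_net_id; infer_instance

-- ===== CLAIM (what is proved, stated in full; the proofs are below) =====
def Claim_equal_net_id : Prop := ∀ (ip_address : String), Dom_net_id ip_address → Spec_net_id ip_address (net_id ip_address)

-- ===== LEMMAS AND PROOFS =====

-- B's parse loop fails exactly where A's validation loop says False
lemma parse_none_iff_check_false (xs : List String) :
    pvParseOctets xs = none ↔ pvCheckOctets xs = false := by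
  induction xs with
  | nil => simp [pvParseOctets, pvCheckOctets]
  | cons s rest ih =>
    simp only [pvParseOctets, pvCheckOctets]
    cases h : PySem.Int.ofStr? s with
    | none => simp
    | some v =>
      by_cases hv : v < 0 ∨ v > 255 <;> simp [hv, ih]

-- when B's parse loop succeeds, it returns exactly the parsed values, all in 0..255
lemma parse_some (xs : List String) (vs : List Int) (h : pvParseOctets xs = some vs) :
    vs = xs.map (fun s => (PySem.Int.ofStr? s).getD 0) ∧
    (∀ s ∈ xs, ∃ v, PySem.Int.ofStr? s = some v) ∧
    ∀ v ∈ vs, 0 ≤ v ∧ v ≤ 255 := by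
  induction xs generalizing vs with
  | nil => simp [pvParseOctets] at h; simp [h]
  | cons s rest ih =>
    simp only [pvParseOctets] at h
    cases hs : PySem.Int.ofStr? s with
    | none => simp [hs] at h
    | some v =>
      rw [hs] at h
      by_cases hv : v < 0 ∨ v > 255
      · simp [hv] at h
      · simp only [if_neg hv, Option.map_eq_some_iff] at h
        obtain ⟨vs', hvs', rfl⟩ := h
        obtain ⟨h1, h2, h3⟩ := ih vs' hvs'
        refine ⟨by simp [hs, ← h1], ?_, ?_⟩
        · intro t ht
          rcases List.mem_cons.mp ht with rfl | ht
          · exact ⟨v, by simp [hs]⟩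
          · exact h2 t ht
        · intro w hw
          rcases List.mem_cons.mp hw with rfl | hw
          · omega
          · exact h3 w hw

-- v & 255 = v for an octet value
lemma band_255 (v : Int) (h0 : 0 ≤ v) (h1 : v ≤ 255) : PySem.Int.band v 255 = v := by
  obtain ⟨n, rfl⟩ := Int.eq_ofNat_of_zero_le h0
  have hn : n < 256 := by exact_mod_cast (by omega : (n : Int) < 256)
  have : (255 : Int) = ((255 : Nat) : Int) := by norm_num
  rw [this, PySem.Int.band_natCast]
  have h255 : (255 : Nat) = 2 ^ 8 - 1 := by norm_num
  rw [h255, Nat.and_two_pow_sub_one_eq_mod, Nat.mod_eq_of_lt (by omega)]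

-- ===== VERDICT (by name: the statement is the Claim_ definition above) =====
-- the four octet strings of a valid address
lemma length_eq_four {α : Type} (l : List α) (h : l.length = 4) :
    ∃ a b c d, l = [a, b, c, d] := by
  match l, h with
  | [a, b, c, d], _ => exact ⟨a, b, c, d, rfl⟩

theorem net_id_spec : Claim_equal_net_id := by
  intro ip _
  unfold Spec_net_id
  by_cases hL : 7 ≤ PySem.Str.len ip ∧ PySem.Str.len ip ≤ 15
  case neg =>
    have hA : is_valid_ip_address ip = false := by
      unfold is_valid_ip_address; rw [if_pos (by omega)]
    have hL' : ¬(7 ≤ ip.length ∧ ip.length ≤ 15) := by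
      simp [PySem.Str.len_eq] at hL; omega
    unfold net_id net_id_alt
    simp [hA, hL']
  case pos =>
    obtain ⟨hL1, hL2⟩ := hL
    have hN1 : 7 ≤ ip.length := by have := hL1; simp [PySem.Str.len_eq] at this; omega
    have hN2 : ip.length ≤ 15 := by have := hL2; simp [PySem.Str.len_eq] at this; omega
    by_cases hlen : ((PySem.Str.split? ip ".").getD []).length = 4
    case neg =>
      have hA : is_valid_ip_address ip = false := by
        unfold is_valid_ip_address
        rw [if_neg (by omega)]
        simp [hlen]
      unfold net_id net_id_alt
      simp [hA, hlen, hN1, hN2]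
    case pos =>
      obtain ⟨s0, s1, s2, s3, hps⟩ := length_eq_four _ hlen
      cases hp : pvParseOctets ((PySem.Str.split? ip ".").getD []) with
      | none =>
        have hchk : pvCheckOctets ((PySem.Str.split? ip ".").getD []) = false :=
          (parse_none_iff_check_false _).mp hp
        have hA : is_valid_ip_address ip = false := by
          unfold is_valid_ip_address
          rw [if_neg (by omega)]
          simp [hlen, hchk]
        unfold net_id net_id_alt
        simp [hA, hlen, hN1, hN2, hp]
      | some vs =>
        obtain ⟨hmap, hparse, hbounds⟩ := parse_some _ _ hp
        rw [hps] at hmap hparse hp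
        obtain ⟨v0, h0⟩ := hparse s0 (by simp)
        obtain ⟨v1, h1⟩ := hparse s1 (by simp)
        obtain ⟨v2, h2⟩ := hparse s2 (by simp)
        obtain ⟨v3, h3⟩ := hparse s3 (by simp)
        have hvs : vs = [v0, v1, v2, v3] := by
          rw [hmap]; simp [h0, h1, h2, h3]
        subst hvs
        have hb0 := hbounds v0 (by simp)
        have hb1 := hbounds v1 (by simp)
        have hb2 := hbounds v2 (by simp)
        have hb3 := hbounds v3 (by simp)
        have hchk : pvCheckOctets [s0, s1, s2, s3] = true := by
          cases hc : pvCheckOctets [s0, s1, s2, s3] with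
          | false => rw [(parse_none_iff_check_false _).mpr hc] at hp; cases hp
          | true => rfl
        have hval : is_valid_ip_address ip = true := by
          unfold is_valid_ip_address
          rw [if_neg (by omega)]
          simp [hps, hchk]
        have hcls : class_ip_address ip =
            (if 1 ≤ v0 ∧ v0 ≤ 126 then "A"
             else if 128 ≤ v0 ∧ v0 ≤ 191 then "B"
             else if 192 ≤ v0 ∧ v0 ≤ 223 then "C"
             else if 224 ≤ v0 ∧ v0 ≤ 239 then "D"
             else if 240 ≤ v0 ∧ v0 ≤ 255 then "E"
             else "Неопределенный класс") := by
          unfold class_ip_address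
          simp [hval, hps, h0, PySem.List.pyGet?, PySem.List.pyIdx?]
        have hBalt : net_id_alt ip =
            (if 1 ≤ v0 ∧ v0 ≤ 126 then
              PySem.Str.join "." [PySem.Int.toStr v0, "0", "0", "0"]
             else if 128 ≤ v0 ∧ v0 ≤ 191 then
              PySem.Str.join "." [PySem.Int.toStr v0, PySem.Int.toStr v1, "0", "0"]
             else if 192 ≤ v0 ∧ v0 ≤ 223 then
              PySem.Str.join "." [PySem.Int.toStr v0, PySem.Int.toStr v1, PySem.Int.toStr v2, "0"]
             else "Не имеет маски по умолчанию") := by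
          unfold net_id_alt
          rw [if_neg (by simp [hN1, hN2])]
          simp only [hps, hp]
          simp [PySem.List.pyGetD]
        by_cases hr1 : 1 ≤ v0 ∧ v0 ≤ 126
        · have hmask : default_mask ip = "255.0.0.0" := by
            unfold default_mask; simp [hval, hcls, hr1]
          rw [hBalt, if_pos hr1]
          unfold net_id
          simp [hval, hmask, hps, h0, h1, h2, h3,
            (by decide : is_valid_ip_address "255.0.0.0" = true),
            (by decide : ((PySem.Str.split? "255.0.0.0" ".").getD []) = ["255", "0", "0", "0"]),
            (by decide : PySem.Int.ofStr? "255" = some 255),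
            (by decide : PySem.Int.ofStr? "0" = some 0),
            (by decide : PySem.Int.toStr 0 = "0"),
            band_255 v0 hb0.1 hb0.2, PySem.Int.band_zero, List.foldl]
        · by_cases hr2 : 128 ≤ v0 ∧ v0 ≤ 191
          · have hmask : default_mask ip = "255.255.0.0" := by
              unfold default_mask; simp [hval, hcls, hr1, hr2]
            rw [hBalt, if_neg hr1, if_pos hr2]
            unfold net_id
            simp [hval, hmask, hps, h0, h1, h2, h3,
              (by decide : is_valid_ip_address "255.255.0.0" = true),
              (by decide : ((PySem.Str.split? "255.255.0.0" ".").getD []) = ["255", "255", "0", "0"]),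
              (by decide : PySem.Int.ofStr? "255" = some 255),
              (by decide : PySem.Int.ofStr? "0" = some 0),
              (by decide : PySem.Int.toStr 0 = "0"),
              band_255 v0 hb0.1 hb0.2, band_255 v1 hb1.1 hb1.2, PySem.Int.band_zero, List.foldl]
          · by_cases hr3 : 192 ≤ v0 ∧ v0 ≤ 223
            · have hmask : default_mask ip = "255.255.255.0" := by
                unfold default_mask; simp [hval, hcls, hr1, hr2, hr3]
              rw [hBalt, if_neg hr1, if_neg hr2, if_pos hr3]
              unfold net_id
              simp [hval, hmask, hps, h0, h1, h2, h3,
                (by decide : is_valid_ip_address "255.255.255.0" = true),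
                (by decide : ((PySem.Str.split? "255.255.255.0" ".").getD []) = ["255", "255", "255", "0"]),
                (by decide : PySem.Int.ofStr? "255" = some 255),
                (by decide : PySem.Int.ofStr? "0" = some 0),
                (by decide : PySem.Int.toStr 0 = "0"),
                band_255 v0 hb0.1 hb0.2, band_255 v1 hb1.1 hb1.2, band_255 v2 hb2.1 hb2.2,
                PySem.Int.band_zero, List.foldl]
            · -- v0 ∈ {0, 127} ∪ [224, 255]: class D/E/undefined, the "mask" is not an IP
              rw [hBalt, if_neg hr1, if_neg hr2, if_neg hr3]
              have hmaskbad : is_valid_ip_address (default_mask ip) = false := by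
                unfold default_mask
                simp only [hval, Bool.not_true, Bool.false_eq_true, if_false, hcls]
                rw [if_neg hr1, if_neg hr2, if_neg hr3]
                by_cases hr4 : 224 ≤ v0 ∧ v0 ≤ 239
                · rw [if_pos hr4]; decide
                · rw [if_neg hr4]
                  by_cases hr5 : 240 ≤ v0 ∧ v0 ≤ 255
                  · rw [if_pos hr5]; decide
                  · rw [if_neg hr5]; decide
              unfold net_id
              simp [hval, hmaskbad]
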